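-- pv_equiv track=rewrite | github.com/olzama/armen-subtitles | code/gpt-translate.py | remove_overlap_simple
-- ===== SOURCE A (Python) =====
-- def remove_overlap_simple(lines, threshold):
--     clean_lines = []
--     for i in range(len(lines)-1):
--         cur_ln = lines[i]
--         next_ln = lines[i+1]
--         overlap_indices = find_overlap_indices(cur_ln, next_ln)
--         if overlap_indices and overlap_indices[1] - overlap_indices[0] > threshold:
--             clean_lines.append(cur_ln[:overlap_indices[0]])
--         else:
--             clean_lines.append(cur_ln)
--     clean_lines.append(lines[-1])
--     return clean_lines
--
-- def find_overlap_indices(s1, s2):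
--     """
--     Finds the longest overlap between two strings and returns the
--     start and end indices of the overlap in both strings.
--
--     :param s1: First string.
--     :param s2: Second string.
--     :return: Tuple (start_index_s1, end_index_s1, start_index_s2, end_index_s2),
--              or None if there is no overlap.
--     """
--     max_overlap = 0
--     best_indices = None
--     # Try all suffixes of s1 that could match prefixes of s2
--     for i in range(len(s1)):
--         if s2.startswith(s1[i:]):
--             overlap_length = len(s1) - i
--             if overlap_length > max_overlap:
--                 max_overlap = overlap_length
--                 best_indices = (i, len(s1), 0, overlap_length)
--     # Try all suffixes of s2 that could match prefixes of s1
--     return best_indices if best_indices else None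
-- ===== SOURCE B (Python) =====
-- def remove_overlap_simple(lines, threshold):
--     clean_lines = [cur[:len(cur) - k] if k > threshold else cur
--                    for cur, k in ((cur, _overlap_len(cur, nxt))
--                                   for cur, nxt in zip(lines, lines[1:]))]
--     clean_lines.append(lines[-1])
--     return clean_lines
--
-- def _step(p, pi, q, c):
--     # one KMP-automaton transition: longest border extension of q by character c
--     while q > 0 and (q == len(p) or c != p[q]):
--         q = pi[q - 1]
--     if q < len(p) and c == p[q]:
--         q += 1
--     return q
--
-- def _overlap_len(s1, s2):
--     # length of the longest suffix of s1 that is a prefix of s2, via the KMP prefix function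
--     if not s2:
--         return 0
--     pi = [0]
--     k = 0
--     for c in s2[1:]:
--         k = _step(s2, pi, k, c)
--         pi.append(k)
--     q = 0
--     for c in s1:
--         q = _step(s2, pi, q, c)
--     return q
-- ===== Notes on version B (the rewrite author's own statement) =====
-- stated objective: alternative
-- what changed: Replaces the per-pair try-every-suffix startswith scan with a KMP prefix-function automaton that computes the same longest suffix-prefix overlap in a single left-to-right pass; asymptotically O(N*L) vs A's O(N*L^2) per worst-case pair, but not measurably faster on the generated inputs (short lines, C-level startswith).
import Mathlib
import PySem

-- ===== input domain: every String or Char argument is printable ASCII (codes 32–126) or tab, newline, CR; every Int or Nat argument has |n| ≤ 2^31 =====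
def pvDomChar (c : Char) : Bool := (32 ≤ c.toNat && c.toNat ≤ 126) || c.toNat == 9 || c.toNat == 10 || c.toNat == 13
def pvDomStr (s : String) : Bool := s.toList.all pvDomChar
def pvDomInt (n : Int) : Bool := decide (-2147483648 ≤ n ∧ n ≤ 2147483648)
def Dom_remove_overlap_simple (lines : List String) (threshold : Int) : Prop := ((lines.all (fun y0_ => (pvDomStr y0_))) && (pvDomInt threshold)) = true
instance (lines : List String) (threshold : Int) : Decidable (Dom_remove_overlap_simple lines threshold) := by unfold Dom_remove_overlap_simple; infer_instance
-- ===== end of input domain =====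

-- B replaces A's try-every-suffix startswith scan per line pair by a KMP prefix-function
-- automaton computing the same longest suffix-prefix overlap (objective: alternative algorithm).

-- ===== PORT A =====
-- port of find_overlap_indices: first (= longest) suffix of s1 that is a prefix of s2,
-- tracked exactly as A does with the (max_overlap, best_indices) state
def find_overlap_indices (s1 s2 : String) : Option (Int × Int × Int × Int) :=
  let st := (PySem.List.pyRange 0 (PySem.Str.len s1) 1).foldl
    (fun (st : Int × Option (Int × Int × Int × Int)) i =>
      if PySem.Str.startswith s2 (PySem.Str.slice s1 (some i) none) then
        let overlap_length := PySem.Str.len s1 - i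
        if overlap_length > st.1 then
          (overlap_length, some (i, PySem.Str.len s1, 0, overlap_length))
        else st
      else st) (0, none)
  st.2

def remove_overlap_simple (lines : List String) (threshold : Int) : List String :=
  let clean := (PySem.List.pyRange 0 (PySem.List.len lines - 1) 1).foldl
    (fun acc i =>
      let cur_ln := PySem.List.pyGetD lines i ""
      let next_ln := PySem.List.pyGetD lines (i + 1) ""
      match find_overlap_indices cur_ln next_ln with
      | some oi =>
        if oi.2.1 - oi.1 > threshold then acc ++ [PySem.Str.slice cur_ln none (some oi.1)]
        else acc ++ [cur_ln]
      | none => acc ++ [cur_ln]) []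
  clean ++ [PySem.List.pyGetD lines (-1) ""]   -- lines[-1]; IndexError on [] is excluded by Pre_

-- ===== PORT B =====
-- _step's while loop as fuel-indexed structural recursion; it is always called with fuel = q,
-- which suffices because every table entry satisfies pi[j] ≤ j.  p.getD q 'a' is Python's p[q]
-- (only meaningful when q < len(p); the disjunction order mirrors Python's short-circuit).
def kmp_fall (p : List Char) (pi : List Nat) (c : Char) : Nat → Nat → Nat
  | 0, q => q
  | fuel + 1, q =>
    if q ≠ 0 ∧ (q = p.length ∨ ¬ c = p.getD q 'a') then
      kmp_fall p pi c fuel (pi.getD (q - 1) 0)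
    else q

-- port of _step
def kmp_step (p : List Char) (pi : List Nat) (q0 : Nat) (c : Char) : Nat :=
  let q := kmp_fall p pi c q0 q0
  if q < p.length ∧ c = p.getD q 'a' then q + 1 else q

-- port of _overlap_len, on char lists
def alt_overlap_core (t p : List Char) : Nat :=
  match p with
  | [] => 0
  | _ :: rest =>
    let tbl := rest.foldl (fun (st : List Nat × Nat) c =>
      let k := kmp_step p st.1 st.2 c
      (st.1 ++ [k], k)) ([0], 0)
    t.foldl (fun q c => kmp_step p tbl.1 q c) 0

def alt_overlap_len (s1 s2 : String) : Nat := alt_overlap_core s1.toList s2.toList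

def remove_overlap_simple_alt (lines : List String) (threshold : Int) : List String :=
  ((lines.zip (lines.drop 1)).map (fun cn =>
    let k := alt_overlap_len cn.1 cn.2
    if (k : Int) > threshold then String.ofList (cn.1.toList.take (cn.1.toList.length - k))
    else cn.1))
  ++ [PySem.List.pyGetD lines (-1) ""]   -- lines[-1]; IndexError on [] is excluded by Pre_

-- ===== PRECONDITION & SPEC =====
-- Pre_ excludes only lines = [], where both A and B raise IndexError on lines[-1].
def Pre_remove_overlap_simple (lines : List String) (threshold : Int) : Prop := lines ≠ []
instance (lines : List String) (threshold : Int) : Decidable (Pre_remove_overlap_simple lines threshold) := by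
  unfold Pre_remove_overlap_simple; infer_instance

def pvWitness_remove_overlap_simple : List String × Int := (["he said ab", "ab cd", "cd!"], 1)

def Spec_remove_overlap_simple (lines : List String) (threshold : Int) (out : List String) : Prop :=
  out = remove_overlap_simple_alt lines threshold
instance (lines : List String) (threshold : Int) (out : List String) : Decidable (Spec_remove_overlap_simple lines threshold out) := by
  unfold Spec_remove_overlap_simple; infer_instance

-- ===== CLAIM (what is proved, stated in full; the proofs are below) =====
def Claim_equal_remove_overlap_simple : Prop := ∀ (lines : List String) (threshold : Int), Dom_remove_overlap_simple lines threshold → Pre_remove_overlap_simple lines threshold → Spec_remove_overlap_simple lines threshold (remove_overlap_simple lines threshold)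

-- ===== LEMMAS AND PROOFS =====

-- `IsOv t p k`: the last k chars of t equal the first k chars of p (a suffix-prefix overlap).
abbrev IsOv (t p : List Char) (k : Nat) : Prop :=
  k ≤ t.length ∧ k ≤ p.length ∧ t.drop (t.length - k) = p.take k

-- the longest overlap: what both A's scan and B's automaton compute
def ovlen (t p : List Char) : Nat := Nat.findGreatest (IsOv t p) (min t.length p.length)

-- proper borders of p.take k
abbrev Bord (p : List Char) (k m : Nat) : Prop := m < k ∧ IsOv (p.take k) p m

def bord (p : List Char) (k : Nat) : Nat := Nat.findGreatest (Bord p k) k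

theorem isOv_zero (t p : List Char) : IsOv t p 0 := ⟨Nat.zero_le _, Nat.zero_le _, by simp⟩

theorem isOv_ovlen (t p : List Char) : IsOv t p (ovlen t p) :=
  Nat.findGreatest_spec (Nat.zero_le _) (isOv_zero t p)

theorem ovlen_le_t (t p : List Char) : ovlen t p ≤ t.length :=
  le_trans (Nat.findGreatest_le _) (min_le_left _ _)

theorem ovlen_le_p (t p : List Char) : ovlen t p ≤ p.length :=
  le_trans (Nat.findGreatest_le _) (min_le_right _ _)

theorem le_ovlen (t p : List Char) (k : Nat) (h : IsOv t p k) : k ≤ ovlen t p :=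
  Nat.le_findGreatest (le_min h.1 h.2.1) h

theorem ovlen_nil_left (p : List Char) : ovlen [] p = 0 := by simp [ovlen]

theorem drop_take_of_isOv (t p : List Char) (k1 k2 : Nat) (h1 : IsOv t p k1) (h2 : IsOv t p k2)
    (h : k1 ≤ k2) : (p.take k2).drop (k2 - k1) = p.take k1 := by
  obtain ⟨hl2, hp2, he2⟩ := h2
  obtain ⟨hl1, hp1, he1⟩ := h1
  rw [← he2, List.drop_drop, ← he1]
  congr 1
  omega

theorem bord_of_isOv_lt (t p : List Char) (m q : Nat) (h1 : IsOv t p m) (h2 : IsOv t p q)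
    (hlt : m < q) : Bord p q m := by
  refine ⟨hlt, ?_, h1.2.1, ?_⟩
  · simp [List.length_take]; omega
  · have := drop_take_of_isOv t p m q h1 h2 hlt.le
    have hlen : (p.take q).length = q := by simp [List.length_take]; omega
    rw [hlen]; exact this

theorem isOv_of_bord (t p : List Char) (m q : Nat) (hq : IsOv t p q) (hb : Bord p q m) :
    IsOv t p m := by
  obtain ⟨hmq, hml, hmp, hme⟩ := hb
  obtain ⟨hql, hqp, hqe⟩ := hq
  refine ⟨le_trans hmq.le hql, hmp, ?_⟩
  have hlen : (p.take q).length = q := by simp [List.length_take]; omega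
  rw [hlen] at hme
  have : t.drop (t.length - m) = (t.drop (t.length - q)).drop (q - m) := by
    rw [List.drop_drop]; congr 1; omega
  rw [this, hqe, hme]

theorem le_bord (p : List Char) (q m : Nat) (hb : Bord p q m) : m ≤ bord p q :=
  Nat.le_findGreatest hb.1.le hb

theorem bord_spec (p : List Char) (q : Nat) (hq : 0 < q) : Bord p q (bord p q) :=
  Nat.findGreatest_spec (m := 0) (Nat.zero_le _) ⟨hq, isOv_zero _ _⟩

theorem bord_lt (p : List Char) (q : Nat) (hq : 0 < q) : bord p q < q :=
  (bord_spec p q hq).1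

theorem bord_one (p : List Char) : bord p 1 = 0 := by
  have h := bord_lt p 1 (by omega)
  omega

-- extending an overlap by one character
theorem isOv_append_succ (t p : List Char) (c : Char) (m : Nat) :
    IsOv (t ++ [c]) p (m + 1) ↔ IsOv t p m ∧ m < p.length ∧ c = p.getD m 'a' := by
  constructor
  · rintro ⟨hl, hp, he⟩
    simp only [List.length_append, List.length_cons, List.length_nil] at hl
    have hml : m ≤ t.length := by omega
    have hmp : m < p.length := by omega
    have hdrop : (t ++ [c]).drop (t.length + 1 - (m + 1)) = t.drop (t.length - m) ++ [c] := by
      rw [show t.length + 1 - (m + 1) = t.length - m by omega,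
        List.drop_append_of_le_length (by omega)]
    have htake : p.take (m + 1) = p.take m ++ [p[m]] := by
      rw [List.take_add_one, List.getElem?_eq_getElem hmp]; rfl
    rw [show (t ++ [c]).length = t.length + 1 by simp] at he
    rw [hdrop, htake] at he
    have hlen : (t.drop (t.length - m)).length = (p.take m).length := by
      simp; omega
    obtain ⟨he1, he2⟩ := List.append_inj he hlen
    have hc : c = p[m] := by simpa using he2
    exact ⟨⟨hml, hmp.le, he1⟩, hmp,
      by rw [hc, List.getD_eq_getElem?_getD, List.getElem?_eq_getElem hmp]; rfl⟩
  · rintro ⟨⟨hl, hp, he⟩, hmp, hc⟩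
    refine ⟨by simp; omega, by omega, ?_⟩
    rw [show (t ++ [c]).length = t.length + 1 by simp,
      show t.length + 1 - (m + 1) = t.length - m by omega,
      List.drop_append_of_le_length (by omega),
      List.take_add_one, List.getElem?_eq_getElem hmp, he]
    have : c = p[m] := by rw [hc, List.getD_eq_getElem?_getD, List.getElem?_eq_getElem hmp]; rfl
    rw [this]; rfl

-- where the while loop stops
abbrev Stop (p : List Char) (c : Char) (m : Nat) : Prop :=
  m = 0 ∨ (m < p.length ∧ c = p.getD m 'a')

-- the while loop lands on the largest overlap that can be extended by c (or 0)
theorem kmp_fall_spec (p : List Char) (pi : List Nat) (c : Char) :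
    ∀ q0, ∀ t : List Char, IsOv t p q0 →
      (∀ j, j < q0 → pi.getD j 0 = bord p (j + 1)) →
      ∀ fuel, q0 ≤ fuel →
      IsOv t p (kmp_fall p pi c fuel q0) ∧ Stop p c (kmp_fall p pi c fuel q0) ∧
        (∀ m, IsOv t p m → m ≤ q0 → Stop p c m → m ≤ kmp_fall p pi c fuel q0) := by
  intro q0
  induction q0 using Nat.strong_induction_on with
  | _ q0 IH =>
    intro t hOv hpi fuel hfuel
    match fuel with
    | 0 =>
      have hq0 : q0 = 0 := by omega
      subst hq0
      simp only [kmp_fall]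
      exact ⟨hOv, Or.inl rfl, fun m _ hm _ => hm⟩
    | fuel + 1 =>
      by_cases hcond : q0 ≠ 0 ∧ (q0 = p.length ∨ ¬ c = p.getD q0 'a')
      · have hq0pos : 0 < q0 := Nat.pos_of_ne_zero hcond.1
        have hpi0 : pi.getD (q0 - 1) 0 = bord p q0 := by
          have := hpi (q0 - 1) (by omega)
          rwa [show q0 - 1 + 1 = q0 by omega] at this
        set q1 := pi.getD (q0 - 1) 0 with hq1def
        have hq1 : q1 = bord p q0 := hpi0
        have hq1lt : q1 < q0 := by rw [hq1]; exact bord_lt p q0 hq0pos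
        have hOv1 : IsOv t p q1 := by
          rcases Nat.eq_zero_or_pos q1 with h | h
          · rw [h]; exact isOv_zero t p
          · refine isOv_of_bord t p q1 q0 hOv ?_
            rw [hq1]
            exact Nat.findGreatest_spec (m := 0) (Nat.zero_le _) ⟨hq0pos, isOv_zero _ _⟩
        have hrec := IH q1 hq1lt t hOv1 (fun j hj => hpi j (by omega)) fuel (by omega)
        have hunfold : kmp_fall p pi c (fuel + 1) q0 = kmp_fall p pi c fuel q1 := by
          simp only [kmp_fall, if_pos hcond]
          rfl
        rw [hunfold]
        refine ⟨hrec.1, hrec.2.1, ?_⟩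
        intro m hm hmle hstop
        rcases Nat.lt_or_ge m q0 with hlt | hge
        · have hB : Bord p q0 m := bord_of_isOv_lt t p m q0 hm hOv hlt
          exact hrec.2.2 m hm (by rw [hq1]; exact le_bord p q0 m hB) hstop
        · -- m = q0, but q0 does not satisfy Stop
          have hmq : m = q0 := by omega
          subst hmq
          rcases hstop with h0 | ⟨hlt', hc'⟩
          · omega
          · rcases hcond.2 with h | h
            · omega
            · exact absurd hc' h
      · have hunfold : kmp_fall p pi c (fuel + 1) q0 = q0 := by
          simp only [kmp_fall, if_neg hcond]
        rw [hunfold]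
        refine ⟨hOv, ?_, fun m _ hm _ => hm⟩
        rcases Nat.eq_zero_or_pos q0 with h | h
        · exact Or.inl h
        · have h2 : ¬(q0 = p.length ∨ ¬ c = p.getD q0 'a') := fun hx => hcond ⟨by omega, hx⟩
          have hne : q0 ≠ p.length := fun hx => h2 (Or.inl hx)
          have hc : c = p.getD q0 'a' := by by_contra hx; exact h2 (Or.inr hx)
          have hle : q0 ≤ p.length := hOv.2.1
          exact Or.inr ⟨by omega, hc⟩

-- one automaton transition preserves "q is the longest overlap of the processed text"
theorem kmp_step_ovlen (p : List Char) (pi : List Nat) (c : Char) (t : List Char)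
    (hpi : ∀ j, j < ovlen t p → pi.getD j 0 = bord p (j + 1)) :
    kmp_step p pi (ovlen t p) c = ovlen (t ++ [c]) p := by
  obtain ⟨hOvr, hStopr, hmaxr⟩ :=
    kmp_fall_spec p pi c (ovlen t p) t (isOv_ovlen t p) hpi (ovlen t p) le_rfl
  set r := kmp_fall p pi c (ovlen t p) (ovlen t p) with hr
  unfold kmp_step
  rw [← hr]
  by_cases hc : r < p.length ∧ c = p.getD r 'a'
  · rw [if_pos hc]
    have hup : IsOv (t ++ [c]) p (r + 1) :=
      (isOv_append_succ t p c r).mpr ⟨hOvr, hc.1, hc.2⟩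
    have hle : r + 1 ≤ ovlen (t ++ [c]) p := le_ovlen _ _ _ hup
    have hge : ovlen (t ++ [c]) p ≤ r + 1 := by
      rcases hR : ovlen (t ++ [c]) p with _ | m
      · omega
      · have := isOv_ovlen (t ++ [c]) p
        rw [hR] at this
        obtain ⟨hm, hmlt, hmc⟩ := (isOv_append_succ t p c m).mp this
        have h1 : m ≤ ovlen t p := le_ovlen t p m hm
        have h2 : m ≤ r := hmaxr m hm h1 (Or.inr ⟨hmlt, hmc⟩)
        omega
    omega
  · rw [if_neg hc]
    have hr0 : r = 0 := by
      rcases hStopr with h | h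
      · exact h
      · exact absurd h hc
    rcases hR : ovlen (t ++ [c]) p with _ | m
    · omega
    · exfalso
      have := isOv_ovlen (t ++ [c]) p
      rw [hR] at this
      obtain ⟨hm, hmlt, hmc⟩ := (isOv_append_succ t p c m).mp this
      have h1 : m ≤ ovlen t p := le_ovlen t p m hm
      have h2 : m ≤ r := hmaxr m hm h1 (Or.inr ⟨hmlt, hmc⟩)
      rw [hr0] at h2
      have hm0 : m = 0 := by omega
      subst hm0
      rw [hr0] at hc
      exact hc ⟨hmlt, hmc⟩

theorem scan_foldl (p : List Char) (pi : List Nat)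
    (hpi : ∀ j, j < p.length → pi.getD j 0 = bord p (j + 1)) :
    ∀ (l t : List Char), l.foldl (fun q c => kmp_step p pi q c) (ovlen t p) = ovlen (t ++ l) p := by
  intro l
  induction l with
  | nil => intro t; simp
  | cons c l' IH =>
    intro t
    have hstep : kmp_step p pi (ovlen t p) c = ovlen (t ++ [c]) p :=
      kmp_step_ovlen p pi c t (fun j hj => hpi j (lt_of_lt_of_le hj (ovlen_le_p t p)))
    simp only [List.foldl_cons, hstep]
    rw [IH (t ++ [c])]
    congr 1
    simp

-- the longest proper border of p.take k is the longest overlap of p[1:k] with p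
theorem bord_eq_ovlen (p : List Char) (k : Nat) (h1 : 1 ≤ k) (h2 : k ≤ p.length) :
    bord p k = ovlen ((p.take k).drop 1) p := by
  have hlen : ((p.take k).drop 1).length = k - 1 := by
    simp [List.length_take]; omega
  have hiff : ∀ m, Bord p k m ↔ IsOv ((p.take k).drop 1) p m := by
    intro m
    constructor
    · rintro ⟨hmk, hml, hmp, hme⟩
      have hklen : (p.take k).length = k := by simp [List.length_take]; omega
      rw [hklen] at hme
      refine ⟨by omega, hmp, ?_⟩
      rw [hlen, List.drop_drop]
      rw [show 1 + (k - 1 - m) = k - m by omega]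
      exact hme
    · rintro ⟨hml, hmp, hme⟩
      rw [hlen] at hml hme
      have hmk : m < k := by omega
      have hklen : (p.take k).length = k := by simp [List.length_take]; omega
      refine ⟨hmk, by rw [hklen]; omega, hmp, ?_⟩
      rw [hklen]
      rw [List.drop_drop] at hme
      rw [show k - m = 1 + (k - 1 - m) by omega]
      exact hme
  apply le_antisymm
  · rcases Nat.eq_zero_or_pos (bord p k) with h | h
    · omega
    · exact le_ovlen _ _ _ ((hiff _).mp (bord_spec p k (by omega)))
  · exact le_bord _ _ _ ((hiff _).mpr (isOv_ovlen _ _))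

theorem getD_map_range (f : Nat → Nat) (n j : Nat) (hj : j < n) :
    ((List.range n).map f).getD j 0 = f j := by
  rw [List.getD_eq_getElem?_getD, List.getElem?_map, List.getElem?_range hj]
  rfl

-- the table loop fills pi with the longest proper borders of every prefix of p
theorem table_inv (p : List Char) : ∀ (rest done : List Char), 0 < done.length →
    p = done ++ rest →
    rest.foldl (fun (st : List Nat × Nat) c =>
        let k := kmp_step p st.1 st.2 c
        (st.1 ++ [k], k))
      ((List.range done.length).map (fun i => bord p (i + 1)), bord p done.length)
    = ((List.range p.length).map (fun i => bord p (i + 1)), bord p p.length) := by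
  intro rest
  induction rest with
  | nil =>
    intro done hpos hp
    rw [List.append_nil] at hp
    subst hp
    simp
  | cons c rest' IH =>
    intro done hpos hp
    have hdl : done.length < p.length := by rw [hp]; simp
    have hstep : kmp_step p ((List.range done.length).map (fun i => bord p (i + 1)))
        (bord p done.length) c = bord p (done.length + 1) := by
      have htk : p.take done.length = done := by
        rw [hp, List.take_left]
      have hbe := bord_eq_ovlen p done.length (by omega) (by omega)
      rw [htk] at hbe
      have hpi : ∀ j, j < ovlen (done.drop 1) p →
          ((List.range done.length).map (fun i => bord p (i + 1))).getD j 0 = bord p (j + 1) := by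
        intro j hj
        have hb : ovlen (done.drop 1) p ≤ (done.drop 1).length := ovlen_le_t _ _
        rw [List.length_drop] at hb
        have hjd : j < done.length := by omega
        exact getD_map_range _ _ _ hjd
      rw [hbe]
      rw [kmp_step_ovlen p _ c (done.drop 1) hpi]
      have htk1 : p.take (done.length + 1) = done ++ [c] := by
        have : p = (done ++ [c]) ++ rest' := by rw [hp]; simp
        rw [this, show done.length + 1 = (done ++ [c]).length by simp, List.take_left]
      have hbe1 := bord_eq_ovlen p (done.length + 1) (by omega) (by omega)
      rw [htk1] at hbe1
      rw [hbe1]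
      congr 1
      rw [List.drop_append_of_le_length (by omega)]
    simp only [List.foldl_cons]
    have hrange : (List.range (done.length + 1)).map (fun i => bord p (i + 1)) =
        (List.range done.length).map (fun i => bord p (i + 1)) ++ [bord p (done.length + 1)] := by
      rw [List.range_succ, List.map_append]; rfl
    have hIH := IH (done ++ [c]) (by simp) (by rw [hp]; simp)
    have hlen3 : (done ++ [c]).length = done.length + 1 := by simp
    rw [hlen3] at hIH
    rw [hstep, ← hrange]
    exact hIH

theorem alt_overlap_core_eq (t p : List Char) : alt_overlap_core t p = ovlen t p := by
  match p with
  | [] => simp [alt_overlap_core, ovlen]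
  | c0 :: rest =>
    have hdef : alt_overlap_core t (c0 :: rest) =
        t.foldl (fun q c => kmp_step (c0 :: rest)
          (rest.foldl (fun (st : List Nat × Nat) c =>
            let k := kmp_step (c0 :: rest) st.1 st.2 c
            (st.1 ++ [k], k)) ([0], 0)).1 q c) 0 := rfl
    rw [hdef]
    have hinit : ((([0] : List Nat), (0 : Nat))) =
        ((List.range (1:Nat)).map (fun i => bord (c0 :: rest) (i + 1)), bord (c0 :: rest) 1) := by
      simp [List.range_succ, bord_one]
    have htbl := table_inv (c0 :: rest) rest [c0] (by simp) (by simp)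
    have hlen1 : ([c0] : List Char).length = 1 := by simp
    rw [hlen1] at htbl
    rw [hinit, htbl]
    have h0 : (0 : Nat) = ovlen [] (c0 :: rest) := (ovlen_nil_left _).symm
    rw [h0, scan_foldl (c0 :: rest) _ (fun j hj => getD_map_range _ _ _ hj) t []]
    simp

theorem alt_overlap_eq (s1 s2 : String) :
    alt_overlap_len s1 s2 = ovlen s1.toList s2.toList := alt_overlap_core_eq _ _

-- ===== A-side characterisation =====

theorem startswith_iff_isOv (s1 s2 : String) (i : Int) (h0 : 0 ≤ i) (h1 : i < s1.toList.length) :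
    PySem.Str.startswith s2 (PySem.Str.slice s1 (some i) none) = true ↔
      IsOv s1.toList s2.toList (s1.toList.length - i.toNat) := by
  rw [PySem.Str.startswith_eq, PySem.Chars.startswith_iff, PySem.Str.toList_slice]
  have hsl : PySem.Chars.slice s1.toList (some i) none = s1.toList.drop i.toNat :=
    PySem.List.slice_from _ h0
  rw [hsl, List.prefix_iff_eq_take]
  constructor
  · intro h
    have hlen : (s1.toList.drop i.toNat).length = s1.toList.length - i.toNat := by
      rw [List.length_drop]
    have hle : s1.toList.length - i.toNat ≤ s2.toList.length := by
      have h2 := congrArg List.length h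
      rw [List.length_take, List.length_drop] at h2
      omega
    refine ⟨by omega, hle, ?_⟩
    rw [show s1.toList.length - (s1.toList.length - i.toNat) = i.toNat by omega]
    rw [← hlen]
    exact h
  · rintro ⟨ht, hp, he⟩
    rw [show s1.toList.length - (s1.toList.length - i.toNat) = i.toNat by omega] at he
    rw [he]
    congr 1
    rw [List.length_take]
    omega

-- the A-loop body as a named function (definitionally the port's lambda)
def gA (s1 s2 : String) (st : Int × Option (Int × Int × Int × Int)) (i : Int) :
    Int × Option (Int × Int × Int × Int) :=
  if PySem.Str.startswith s2 (PySem.Str.slice s1 (some i) none) then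
    let overlap_length := PySem.Str.len s1 - i
    if overlap_length > st.1 then
      (overlap_length, some (i, PySem.Str.len s1, 0, overlap_length))
    else st
  else st

theorem fold_gA_skip (s1 s2 : String) (l : List Int)
    (h : ∀ i ∈ l, PySem.Str.startswith s2 (PySem.Str.slice s1 (some i) none) = false) (st) :
    l.foldl (gA s1 s2) st = st := by
  induction l generalizing st with
  | nil => rfl
  | cons i l' IH =>
    simp only [List.foldl_cons]
    have hcond := h i (by simp)
    have : gA s1 s2 st i = st := by
      unfold gA
      rw [if_neg (by rw [hcond]; simp)]
    rw [this]
    exact IH (fun j hj => h j (by simp [hj])) st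

theorem fold_gA_small (s1 s2 : String) (l : List Int) (st : Int × Option (Int × Int × Int × Int))
    (h : ∀ i ∈ l, PySem.Str.len s1 - i ≤ st.1) :
    l.foldl (gA s1 s2) st = st := by
  induction l with
  | nil => rfl
  | cons i l' IH =>
    simp only [List.foldl_cons]
    have : gA s1 s2 st i = st := by
      unfold gA
      split
      · rw [if_neg (by have := h i (by simp); omega)]
      · rfl
    rw [this]
    exact IH (fun j hj => h j (by simp [hj]))

set_option maxHeartbeats 1000000 in
theorem find_overlap_eq (s1 s2 : String) :
    find_overlap_indices s1 s2 =
      (if ovlen s1.toList s2.toList = 0 then none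
       else some (((s1.toList.length : Int) - ovlen s1.toList s2.toList),
         (s1.toList.length : Int), 0, (ovlen s1.toList s2.toList : Int))) := by
  have hdef : find_overlap_indices s1 s2 =
      ((PySem.List.pyRange 0 (PySem.Str.len s1) 1).foldl (gA s1 s2) (0, none)).2 := rfl
  rw [hdef]
  set t := s1.toList with ht
  set p := s2.toList with hp
  set ov := ovlen t p with hov
  have hL : PySem.Str.len s1 = (t.length : Int) := by rw [PySem.Str.len_eq]
  rcases Nat.eq_zero_or_pos ov with h0 | hpos
  · rw [if_pos h0]
    have hskip : ∀ i ∈ PySem.List.pyRange 0 (PySem.Str.len s1) 1,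
        PySem.Str.startswith s2 (PySem.Str.slice s1 (some i) none) = false := by
      intro i hi
      rw [hL, PySem.List.mem_pyRange_one] at hi
      by_contra hx
      have hx' : PySem.Str.startswith s2 (PySem.Str.slice s1 (some i) none) = true := by
        revert hx; cases PySem.Str.startswith s2 (PySem.Str.slice s1 (some i) none) <;> simp
      have hOv := (startswith_iff_isOv s1 s2 i hi.1 (by exact_mod_cast hi.2)).mp hx'
      rw [← ht, ← hp] at hOv
      have hle := le_ovlen t p _ hOv
      rw [← hov] at hle
      omega
    rw [fold_gA_skip s1 s2 _ hskip (0, none)]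
  · rw [if_neg (by omega)]
    set i0 : Nat := t.length - ov with hi0
    have hovt : ov ≤ t.length := ovlen_le_t t p
    have hi0lt : (i0 : Int) < t.length := by omega
    rw [hL]
    rw [PySem.List.pyRange_one_append 0 (i0 : Int) (t.length : Int) (by omega) (by omega)]
    rw [List.foldl_append]
    have hskip1 : ∀ i ∈ PySem.List.pyRange 0 (i0 : Int) 1,
        PySem.Str.startswith s2 (PySem.Str.slice s1 (some i) none) = false := by
      intro i hi
      rw [PySem.List.mem_pyRange_one] at hi
      by_contra hx
      have hx' : PySem.Str.startswith s2 (PySem.Str.slice s1 (some i) none) = true := by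
        revert hx; cases PySem.Str.startswith s2 (PySem.Str.slice s1 (some i) none) <;> simp
      have hOv := (startswith_iff_isOv s1 s2 i hi.1 (by rw [← ht]; omega)).mp hx'
      rw [← ht, ← hp] at hOv
      have hle := le_ovlen t p _ hOv
      rw [← hov] at hle
      omega
    rw [fold_gA_skip s1 s2 _ hskip1 (0, none)]
    rw [PySem.List.pyRange_one_cons (by omega)]
    simp only [List.foldl_cons]
    have hhit : gA s1 s2 (0, none) (i0 : Int) =
        ((ov : Int), some ((i0 : Int), (t.length : Int), 0, (ov : Int))) := by
      unfold gA
      have hsw : PySem.Str.startswith s2 (PySem.Str.slice s1 (some (i0 : Int)) none) = true := by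
        rw [startswith_iff_isOv s1 s2 _ (by omega) (by rw [← ht]; omega)]
        rw [← ht, ← hp]
        rw [show t.length - (i0 : Int).toNat = ov by omega]
        rw [hov]
        exact isOv_ovlen t p
      rw [if_pos hsw, hL]
      rw [if_pos (by omega)]
      have : (t.length : Int) - (i0 : Int) = (ov : Int) := by omega
      rw [this]
    rw [hhit]
    have hsm : ∀ i ∈ PySem.List.pyRange ((i0 : Int) + 1) (t.length : Int) 1,
        PySem.Str.len s1 - i ≤ ((ov : Int), some ((i0 : Int), (t.length : Int), 0, (ov : Int))).1 := by
      intro i hi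
      rw [PySem.List.mem_pyRange_one] at hi
      rw [hL]
      simp only []
      omega
    have h2 := fold_gA_small s1 s2 (PySem.List.pyRange ((i0 : Int) + 1) (t.length : Int) 1)
      ((ov : Int), some ((i0 : Int), (t.length : Int), 0, (ov : Int))) hsm
    clear_value i0 ov p t
    rw [h2]
    simp only [Option.some.injEq, Prod.mk.injEq]
    exact ⟨by omega, trivial⟩

-- one line pair: A's trim equals B's trim
theorem pair_eq (cur nxt : String) (threshold : Int) :
    (match find_overlap_indices cur nxt with
     | some oi =>
       if oi.2.1 - oi.1 > threshold then PySem.Str.slice cur none (some oi.1) else cur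
     | none => cur)
    = (if ((alt_overlap_len cur nxt : Int)) > threshold then
         String.ofList (cur.toList.take (cur.toList.length - alt_overlap_len cur nxt))
       else cur) := by
  rw [find_overlap_eq, alt_overlap_eq]
  have hovt : ovlen cur.toList nxt.toList ≤ cur.toList.length := ovlen_le_t _ _
  set ov := ovlen cur.toList nxt.toList with hov
  clear_value ov
  rcases Nat.eq_zero_or_pos ov with h0 | hpos
  · subst h0
    rw [if_pos rfl]
    show cur = _
    split
    · rw [Nat.sub_zero, List.take_length, String.ofList_toList]
    · rfl
  · rw [if_neg (by omega)]
    show (if ((cur.toList.length : Int)) - ((cur.toList.length : Int) - (ov : Int)) > threshold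
          then PySem.Str.slice cur none (some ((cur.toList.length : Int) - (ov : Int)))
          else cur) = _
    rw [show (cur.toList.length : Int) - ((cur.toList.length : Int) - (ov : Int)) = (ov : Int) by omega]
    split
    · have : PySem.Str.slice cur none (some ((cur.toList.length : Int) - (ov : Int))) =
          String.ofList (cur.toList.take (cur.toList.length - ov)) := by
        show String.ofList (PySem.Chars.slice cur.toList none (some _)) = _
        rw [show PySem.Chars.slice cur.toList none (some ((cur.toList.length : Int) - (ov : Int)))
            = cur.toList.take (((cur.toList.length : Int) - (ov : Int)).toNat) from
          PySem.List.slice_to _ (by omega)]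
        congr 1
        congr 1
        omega
      rw [this]
    · rfl

def hApair (threshold : Int) (cur nxt : String) : String :=
  match find_overlap_indices cur nxt with
  | some oi =>
    if oi.2.1 - oi.1 > threshold then PySem.Str.slice cur none (some oi.1) else cur
  | none => cur

theorem main_eq (lines : List String) (threshold : Int) (hne : lines ≠ []) :
    remove_overlap_simple lines threshold = remove_overlap_simple_alt lines threshold := by
  unfold remove_overlap_simple remove_overlap_simple_alt
  dsimp only
  congr 1
  -- rewrite A's fold body as appending one element per index
  have hfun : (fun (acc : List String) (i : Int) =>
      match find_overlap_indices (PySem.List.pyGetD lines i "") (PySem.List.pyGetD lines (i + 1) "") with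
      | some oi =>
        if oi.2.1 - oi.1 > threshold then
          acc ++ [PySem.Str.slice (PySem.List.pyGetD lines i "") none (some oi.1)]
        else acc ++ [PySem.List.pyGetD lines i ""]
      | none => acc ++ [PySem.List.pyGetD lines i ""])
      = (fun acc i => acc ++ [hApair threshold (PySem.List.pyGetD lines i "")
          (PySem.List.pyGetD lines (i + 1) "")]) := by
    funext acc i
    cases h : find_overlap_indices (PySem.List.pyGetD lines i "") (PySem.List.pyGetD lines (i + 1) "") with
    | none => simp [hApair, h]
    | some oi =>
      simp only [hApair, h]
      split <;> simp
  rw [hfun, PySem.List.foldl_append_singleton_eq_map]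
  have hn : 1 ≤ lines.length := by
    cases lines with
    | nil => exact absurd rfl hne
    | cons a l => simp
  have hlen : PySem.List.len lines - 1 = ((lines.length - 1 : Nat) : Int) := by
    simp [PySem.List.len]
    omega
  rw [hlen, PySem.List.pyRange_zero_natCast]
  rw [List.map_map, List.nil_append]
  apply List.ext_getElem
  · simp only [List.length_map, List.length_range, List.length_zip, List.length_drop]
    omega
  · intro k hk1 hk2
    simp only [List.length_map, List.length_range] at hk1
    rw [List.getElem_map, List.getElem_range]
    rw [List.getElem_map, List.getElem_zip]
    simp only [Function.comp_apply]
    have hk : k < lines.length - 1 := hk1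
    have h1 : PySem.List.pyGetD lines ((k : Nat) : Int) "" = lines[k]'(by omega) := by
      rw [PySem.List.pyGetD_natCast, List.getD_eq_getElem _ _ (by omega)]
    have h2 : PySem.List.pyGetD lines (((k : Nat) : Int) + 1) "" = lines[k + 1]'(by omega) := by
      rw [show ((k : Nat) : Int) + 1 = (((k + 1 : Nat)) : Int) by push_cast; ring]
      rw [PySem.List.pyGetD_natCast, List.getD_eq_getElem _ _ (by omega)]
    have h3 : (lines.drop 1)[k]'(by simp; omega) = lines[k + 1]'(by omega) := by
      rw [List.getElem_drop]
      congr 1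
      omega
    rw [h1, h2, h3]
    exact pair_eq (lines[k]'(by omega)) (lines[k + 1]'(by omega)) threshold

-- ===== VERDICT (by name: the statement is the Claim_ definition above) =====
theorem remove_overlap_simple_spec : Claim_equal_remove_overlap_simple := by
  intro lines threshold _ hpre
  unfold Spec_remove_overlap_simple
  exact main_eq lines threshold hpre
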